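-- pv_equiv track=rewrite | github.com/MurphysLa-w/JCFG_PoU | streamlit_app.py | wrap_log_expr
-- ===== SOURCE A (Python) =====
-- def wrap_log_expr(text):
-- 	result = []
-- 	i = 0
-- 	while i < len(text):
-- 		if text[i:i+5] == r"\log{":
-- 			start = i
-- 			i += 5
-- 			brace_depth = 1
-- 			while i < len(text) and brace_depth > 0:
-- 				if text[i] == "{":
-- 					brace_depth += 1
-- 				elif text[i] == "}":
-- 					brace_depth -= 1
-- 				i += 1
-- 			log_expr = text[start:i]
-- 			result.append(f"({log_expr})")
-- 		else:
-- 			result.append(text[i])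
-- 			i += 1
-- 	return "".join(result)
-- ===== SOURCE B (Python) =====
-- def wrap_log_expr(text):
-- 	n = len(text)
-- 	# pass 1: match each '{' index to its closing '}' index (unmatched -> n)
-- 	match = {}
-- 	stack = []
-- 	for j, ch in enumerate(text):
-- 		if ch == '{':
-- 			stack.append(j)
-- 		elif ch == '}':
-- 			if stack:
-- 				match[stack.pop()] = j
-- 	for j in stack:
-- 		match[j] = n
-- 	# pass 2: cursor walk, copying whole \log{...} spans via the table
-- 	out = []
-- 	i = 0
-- 	while i < n:
-- 		if text[i:i+5] == "\\log{":
-- 			m = match[i + 4]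
-- 			out.append("(" + text[i:m+1] + ")")
-- 			i = m + 1
-- 		else:
-- 			out.append(text[i])
-- 			i += 1
-- 	return "".join(out)
-- ===== Notes on version B (the rewrite author's own statement) =====
-- stated objective: alternative
-- what changed: A interleaves pattern matching with an inner brace-depth scan in one char-by-char loop; B first builds a brace-match table (a stack pass mapping each open-brace index to its closing-brace index, unmatched ones to len(text)) and then walks a cursor that copies each log-expression span wholesale via a single table lookup.
import Mathlib
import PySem

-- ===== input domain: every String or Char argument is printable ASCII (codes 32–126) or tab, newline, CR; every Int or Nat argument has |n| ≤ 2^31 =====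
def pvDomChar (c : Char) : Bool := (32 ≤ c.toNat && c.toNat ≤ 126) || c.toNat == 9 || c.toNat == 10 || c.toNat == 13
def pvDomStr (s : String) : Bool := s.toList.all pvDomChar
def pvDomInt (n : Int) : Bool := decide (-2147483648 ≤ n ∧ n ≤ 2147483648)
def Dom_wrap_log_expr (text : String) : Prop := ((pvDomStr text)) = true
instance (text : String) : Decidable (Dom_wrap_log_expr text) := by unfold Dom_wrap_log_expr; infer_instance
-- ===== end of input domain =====

-- B replaces A's interleaved scan with a precomputed brace-match table plus a span-copying cursor pass (objective: alternative, same cost).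

-- ===== PORT A =====
-- the pattern r"\log{" (shared string constant)
def wlaPat : List Char := ['\\', 'l', 'o', 'g', '{']

-- A's inner while loop: consume chars while brace_depth > 0; returns (consumed span, rest)
def wlaScan : List Char → Int → List Char × List Char
  | [], _ => ([], [])
  | c :: rest, depth =>
    if depth > 0 then
      let d' := if c = '{' then depth + 1 else if c = '}' then depth - 1 else depth
      let r := wlaScan rest d'
      (c :: r.1, r.2)
    else ([], c :: rest)

-- needed by wlaMain's termination proof
theorem wlaScan_len (cs : List Char) (d : Int) : (wlaScan cs d).2.length ≤ cs.length := by
  induction cs generalizing d with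
  | nil => simp [wlaScan]
  | cons c rest ih =>
    simp only [wlaScan]
    split
    · exact le_trans (ih _) (by simp)
    · simp

-- A's outer while loop over the text
def wlaMain : List Char → List Char
  | [] => []
  | c :: rest =>
    if (c :: rest).take 5 = wlaPat then
      let r := wlaScan (rest.drop 4) 1
      '(' :: ((c :: rest).take 5 ++ r.1) ++ ')' :: wlaMain r.2
    else c :: wlaMain rest
termination_by cs => cs.length
decreasing_by
  · have h1 := wlaScan_len (rest.drop 4) 1
    have h2 : (rest.drop 4).length ≤ rest.length := by simp
    simp only [List.length_cons]; omega
  · simp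

def wrap_log_expr (text : String) : String := String.ofList (wlaMain text.toList)

-- ===== PORT B =====
-- pass 1 (Source B's enumerate loop body): stack of open-brace indices; dict assignment ported as
-- append since each key is assigned at most once in this program (exact here)
def wlbStep : List Int × List (Int × Int) → Int × Char → List Int × List (Int × Int)
  | (st, d), (j, c) =>
    if c = '{' then (j :: st, d)
    else if c = '}' then
      match st with
      | [] => (st, d)
      | p :: st' => (st', d ++ [(p, j)])
    else (st, d)

def wlbPass1 (l : List (Int × Char)) (sd : List Int × List (Int × Int)) :
    List Int × List (Int × Int) :=
  l.foldl wlbStep sd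

-- Source B's "for j in stack: match[j] = n" (Python's stack list is bottom-first = our reverse);
-- again a fresh-key dict assignment, ported as append (exact here)
def wlbFinish (n : Int) (sd : List Int × List (Int × Int)) : List (Int × Int) :=
  sd.1.reverse.foldl (fun d j => d ++ [(j, n)]) sd.2

def wlbTable (cs : List Char) : List (Int × Int) :=
  wlbFinish (cs.length : Int) (wlbPass1 (PySem.List.enumerate cs 0) ([], []))

-- pass 2 (Source B's while loop); fuel only makes the loop total: each step moves the cursor right
def wlbPass2 (cs : List Char) (d : List (Int × Int)) : Nat → Int → List Char
  | 0, _ => []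
  | fuel + 1, i =>
    if i < (cs.length : Int) then
      if PySem.List.slice cs (some i) (some (i + 5)) = wlaPat then
        match List.lookup (i + 4) d with
        | some m => '(' :: (PySem.List.slice cs (some i) (some (m + 1))) ++ ')' :: wlbPass2 cs d fuel (m + 1)
        | none => []   -- unreachable: every open-brace index is a key of the table (Python: KeyError)
      else
        match PySem.List.pyGet? cs i with
        | some c => c :: wlbPass2 cs d fuel (i + 1)
        | none => []   -- unreachable: 0 ≤ i < len(text)
    else []

def wrap_log_expr_alt (text : String) : String :=
  String.ofList (wlbPass2 text.toList (wlbTable text.toList) text.toList.length 0)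

-- ===== PRECONDITION & SPEC =====
def Spec_wrap_log_expr (text : String) (out : String) : Prop := out = wrap_log_expr_alt text
instance (text : String) (out : String) : Decidable (Spec_wrap_log_expr text out) := by unfold Spec_wrap_log_expr; infer_instance

-- ===== CLAIM (what is proved, stated in full; the proofs are below) =====
def Claim_equal_wrap_log_expr : Prop := ∀ (text : String), Dom_wrap_log_expr text → Spec_wrap_log_expr text (wrap_log_expr text)

-- ===== LEMMAS AND PROOFS =====

-- proof-side spec: offset (counted from just after an open brace) of the '}' that closes it, if any
def sIdx1 : List Char → Option Nat
  | [] => none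
  | c :: rest =>
    if c = '}' then some 0
    else if c = '{' then
      (sIdx1 rest).bind (fun m => (sIdx1 (rest.drop (m + 1))).map (fun k => m + 2 + k))
    else (sIdx1 rest).map (· + 1)
termination_by cs => cs.length
decreasing_by
  · simp
  · simp only [List.length_cons]
    have : (rest.drop (m + 1)).length ≤ rest.length := by simp
    omega
  · simp

theorem wlaScan_zero (cs : List Char) : wlaScan cs 0 = ([], cs) := by
  cases cs <;> simp [wlaScan]

-- A's depth scan, characterised by sIdx1
theorem wlaScan_sIdx (N : Nat) : ∀ cs : List Char, cs.length ≤ N → ∀ d : Nat,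
    (∀ m, sIdx1 cs = some m →
      wlaScan cs ((d : Int) + 1) =
        (cs.take (m + 1) ++ (wlaScan (cs.drop (m + 1)) (d : Int)).1,
         (wlaScan (cs.drop (m + 1)) (d : Int)).2))
    ∧ (sIdx1 cs = none → wlaScan cs ((d : Int) + 1) = (cs, [])) := by
  induction N with
  | zero =>
    intro cs hcs d
    have h0 : cs = [] := List.eq_nil_of_length_eq_zero (by omega)
    subst h0
    exact ⟨fun m hm => by simp [sIdx1] at hm, fun _ => by simp [wlaScan]⟩
  | succ N ih =>
    intro cs hcs d
    cases cs with
    | nil => exact ⟨fun m hm => by simp [sIdx1] at hm, fun _ => by simp [wlaScan]⟩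
    | cons c rest =>
      have hrest : rest.length ≤ N := by simp at hcs; omega
      have hpos : ((d : Int) + 1) > 0 := by positivity
      by_cases hc1 : c = '}'
      · subst hc1
        constructor
        · intro m hm
          simp [sIdx1] at hm
          subst hm
          simp [wlaScan, hpos]
        · intro hm; simp [sIdx1] at hm
      · by_cases hc2 : c = '{'
        · subst hc2
          cases hs : sIdx1 rest with
          | none =>
            constructor
            · intro m hm; simp [sIdx1, hs] at hm
            · intro _
              have h2 := (ih rest hrest (d + 1)).2 hs
              have hcast : ((d : Int) + 1 + 1) = (((d + 1 : Nat) : Int) + 1) := by push_cast; ring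
              simp [wlaScan, hpos, hcast, h2]
          | some m =>
            have hdm : (rest.drop (m + 1)).length ≤ N :=
              le_trans (by simp) hrest
            cases hs2 : sIdx1 (rest.drop (m + 1)) with
            | none =>
              constructor
              · intro M hM; simp [sIdx1, hs, hs2] at hM
              · intro _
                have h1 := (ih rest hrest (d + 1)).1 m hs
                have h2 := (ih (rest.drop (m + 1)) hdm d).2 hs2
                have hcast : ((d : Int) + 1 + 1) = (((d + 1 : Nat) : Int) + 1) := by push_cast; ring
                have hc1' : (((d + 1 : Nat)) : Int) = (d : Int) + 1 := by push_cast; ring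
                rw [hc1'] at h1
                rw [h2] at h1
                simp [wlaScan, hpos, h1, List.take_append_drop]
            | some k =>
              constructor
              · intro M hM
                simp [sIdx1, hs, hs2] at hM
                subst hM
                have h1 := (ih rest hrest (d + 1)).1 m hs
                have h2 := (ih (rest.drop (m + 1)) hdm d).1 k hs2
                have hc1' : (((d + 1 : Nat)) : Int) = (d : Int) + 1 := by push_cast; ring
                rw [hc1'] at h1
                rw [h2] at h1
                have hdrop : rest.drop (m + 2 + k) = (rest.drop (m + 1)).drop (k + 1) := by
                  rw [List.drop_drop]; ring_nf
                have htake : rest.take (m + 2 + k) = rest.take (m + 1) ++ (rest.drop (m + 1)).take (k + 1) := by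
                  rw [← List.take_add]; ring_nf
                simp [wlaScan, hpos, h1, htake, hdrop]
              · intro hM; simp [sIdx1, hs, hs2] at hM
        · -- ordinary character
          cases hs : sIdx1 rest with
          | none =>
            constructor
            · intro m hm; simp [sIdx1, hs, hc1, hc2] at hm
            · intro _
              have h2 := (ih rest hrest d).2 hs
              simp [wlaScan, hpos, hc1, hc2, h2]
          | some m =>
            constructor
            · intro M hM
              simp [sIdx1, hs, hc1, hc2] at hM
              subst hM
              have h1 := (ih rest hrest d).1 m hs
              simp [wlaScan, hpos, hc1, hc2, h1]
            · intro hM; simp [sIdx1, hs, hc1, hc2] at hM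

-- one step of B's pass 1
theorem step_stack_sub (st : List Int) (d : List (Int × Int)) (j : Int) (c : Char) :
    ∀ q ∈ (wlbStep (st, d) (j, c)).1, q = j ∨ q ∈ st := by
  intro q hq
  simp only [wlbStep] at hq
  split_ifs at hq
  · simp at hq; tauto
  · cases st with
    | nil => simp at hq
    | cons p st' => simp at hq; tauto
  · tauto

theorem step_dict_append (st : List Int) (d : List (Int × Int)) (j : Int) (c : Char) :
    ∃ δ, (wlbStep (st, d) (j, c)).2 = d ++ δ ∧ ∀ q ∈ δ.map Prod.fst, q ∈ st := by
  simp only [wlbStep]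
  split_ifs
  · exact ⟨[], by simp⟩
  · cases st with
    | nil => exact ⟨[], by simp⟩
    | cons p st' => exact ⟨[(p, j)], by simp⟩
  · exact ⟨[], by simp⟩

theorem pass1_stack_sub : ∀ (l : List (Int × Char)) (sd : List Int × List (Int × Int)),
    ∀ q ∈ (wlbPass1 l sd).1, q ∈ sd.1 ∨ q ∈ l.map Prod.fst := by
  intro l
  induction l with
  | nil => intro sd q hq; simp [wlbPass1] at hq; tauto
  | cons x t ih =>
    intro sd q hq
    obtain ⟨st, d⟩ := sd
    obtain ⟨j, c⟩ := x
    simp only [wlbPass1, List.foldl_cons] at hq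
    rcases ih _ q hq with h | h
    · rcases step_stack_sub st d j c q h with h | h
      · right; simp [h]
      · left; exact h
    · right; simp [h]

theorem pass1_dict_append : ∀ (l : List (Int × Char)) (sd : List Int × List (Int × Int)),
    ∃ Δ, (wlbPass1 l sd).2 = sd.2 ++ Δ
      ∧ (∀ q ∈ Δ.map Prod.fst, q ∈ sd.1 ∨ q ∈ l.map Prod.fst) := by
  intro l
  induction l with
  | nil => exact fun sd => ⟨[], by simp [wlbPass1]⟩
  | cons x t ih =>
    intro sd
    obtain ⟨st, d⟩ := sd
    obtain ⟨j, c⟩ := x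
    obtain ⟨δ, hδ, hδk⟩ := step_dict_append st d j c
    obtain ⟨Δ, hΔ, hΔk⟩ := ih (wlbStep (st, d) (j, c))
    refine ⟨δ ++ Δ, ?_, ?_⟩
    · simp only [wlbPass1, List.foldl_cons] at *
      rw [hΔ, hδ, List.append_assoc]
    · intro q hq
      simp only [List.map_append, List.mem_append] at hq
      rcases hq with h | h
      · left; exact hδk q h
      · rcases hΔk q h with h | h
        · rcases step_stack_sub st d j c q h with h | h
          · right; simp [h]
          · left; exact h
        · right; simp [h]

-- B's stack pass, characterised by sIdx1 (p is the top of the stack)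
theorem pass1_top (N : Nat) : ∀ cs : List Char, cs.length ≤ N →
    ∀ (k : Int) (st : List Int) (d : List (Int × Int)) (p : Int),
    (∀ m, sIdx1 cs = some m → ∃ d₁,
        wlbPass1 (PySem.List.enumerate cs k) (p :: st, d) =
          wlbPass1 (PySem.List.enumerate (cs.drop (m + 1)) (k + m + 1))
            (st, d ++ d₁ ++ [(p, k + m)])
        ∧ (∀ q ∈ d₁.map Prod.fst, k ≤ q))
    ∧ (sIdx1 cs = none → ∃ st₁ d₁,
        wlbPass1 (PySem.List.enumerate cs k) (p :: st, d) = (st₁ ++ p :: st, d ++ d₁)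
        ∧ (∀ q ∈ d₁.map Prod.fst, k ≤ q) ∧ (∀ q ∈ st₁, k ≤ q)) := by
  induction N with
  | zero =>
    intro cs hcs k st d p
    have h0 : cs = [] := List.eq_nil_of_length_eq_zero (by omega)
    subst h0
    refine ⟨fun m hm => by simp [sIdx1] at hm, fun _ => ⟨[], [], ?_, by simp, by simp⟩⟩
    simp [wlbPass1, PySem.List.enumerate_nil]
  | succ N ih =>
    intro cs hcs k st d p
    cases cs with
    | nil =>
      refine ⟨fun m hm => by simp [sIdx1] at hm, fun _ => ⟨[], [], ?_, by simp, by simp⟩⟩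
      simp [wlbPass1, PySem.List.enumerate_nil]
    | cons c rest =>
      have hrest : rest.length ≤ N := by simp at hcs; omega
      have hcons : wlbPass1 (PySem.List.enumerate (c :: rest) k) (p :: st, d)
          = wlbPass1 (PySem.List.enumerate rest (k + 1)) (wlbStep (p :: st, d) (k, c)) := by
        rw [PySem.List.enumerate_cons]; rfl
      by_cases hc1 : c = '}'
      · subst hc1
        have hstep : wlbStep (p :: st, d) (k, '}') = (st, d ++ [(p, k)]) := by
          simp [wlbStep]
        constructor
        · intro m hm
          simp [sIdx1] at hm
          subst hm
          refine ⟨[], ?_, by simp⟩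
          rw [hcons, hstep]
          norm_num
        · intro hm; simp [sIdx1] at hm
      · by_cases hc2 : c = '{'
        · subst hc2
          have hstep : wlbStep (p :: st, d) (k, '{') = (k :: p :: st, d) := by
            simp [wlbStep]
          cases hs : sIdx1 rest with
          | none =>
            constructor
            · intro m hm; simp [sIdx1, hs] at hm
            · intro _
              obtain ⟨st₁, d₁, he, hd₁, hst₁⟩ := (ih rest hrest (k + 1) (p :: st) d k).2 hs
              refine ⟨st₁ ++ [k], d₁, ?_, fun q hq => by have := hd₁ q hq; omega,
                fun q hq => ?_⟩
              · rw [hcons, hstep, he]; simp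
              · rcases List.mem_append.1 hq with h | h
                · have := hst₁ q h; omega
                · simp at h; omega
          | some m =>
            have hdm : (rest.drop (m + 1)).length ≤ N := le_trans (by simp) hrest
            obtain ⟨d₁, he1, hd₁⟩ := (ih rest hrest (k + 1) (p :: st) d k).1 m hs
            cases hs2 : sIdx1 (rest.drop (m + 1)) with
            | none =>
              constructor
              · intro M hM; simp [sIdx1, hs, hs2] at hM
              · intro _
                obtain ⟨st₁, d₂, he2, hd₂, hst₁⟩ :=
                  (ih (rest.drop (m + 1)) hdm (k + 1 + m + 1) st
                    (d ++ d₁ ++ [(k, k + 1 + m)]) p).2 hs2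
                refine ⟨st₁, d₁ ++ [(k, k + 1 + (m : Int))] ++ d₂, ?_, ?_, ?_⟩
                · rw [hcons, hstep, he1, he2]
                  simp [List.append_assoc]
                · intro q hq
                  have hq' : q ∈ List.map Prod.fst d₁ ∨ q = k ∨ q ∈ List.map Prod.fst d₂ := by
                    simpa using hq
                  rcases hq' with h | h | h
                  · have := hd₁ q h; omega
                  · omega
                  · have := hd₂ q h; omega
                · intro q hq; have := hst₁ q hq; omega
            | some k2 =>
              constructor
              · intro M hM
                simp [sIdx1, hs, hs2] at hM
                subst hM
                obtain ⟨d₂, he2, hd₂⟩ :=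
                  (ih (rest.drop (m + 1)) hdm (k + 1 + m + 1) st
                    (d ++ d₁ ++ [(k, k + 1 + m)]) p).1 k2 hs2
                refine ⟨d₁ ++ [(k, k + 1 + (m : Int))] ++ d₂, ?_, ?_⟩
                · rw [hcons, hstep, he1, he2]
                  have ed : (List.drop (m + 1) rest).drop (k2 + 1) = List.drop (m + 2 + k2 + 1) ('{' :: rest) := by
                    rw [List.drop_drop, List.drop_succ_cons]; congr 1; omega
                  have ei : k + 1 + (m : Int) + 1 + (k2 : Int) + 1 = k + ((m + 2 + k2 : Nat) : Int) + 1 := by push_cast; ring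
                  have ev : k + 1 + (m : Int) + 1 + (k2 : Int) = k + ((m + 2 + k2 : Nat) : Int) := by push_cast; ring
                  rw [ed, ei, ev]
                  simp [List.append_assoc]
                · intro q hq
                  have hq' : q ∈ List.map Prod.fst d₁ ∨ q = k ∨ q ∈ List.map Prod.fst d₂ := by
                    simpa using hq
                  rcases hq' with h | h | h
                  · have := hd₁ q h; omega
                  · omega
                  · have := hd₂ q h; omega
              · intro hM; simp [sIdx1, hs, hs2] at hM
        · -- ordinary character
          have hstep : wlbStep (p :: st, d) (k, c) = (p :: st, d) := by
            simp [wlbStep, hc1, hc2]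
          cases hs : sIdx1 rest with
          | none =>
            constructor
            · intro m hm; simp [sIdx1, hs, hc1, hc2] at hm
            · intro _
              obtain ⟨st₁, d₁, he, hd₁, hst₁⟩ := (ih rest hrest (k + 1) st d p).2 hs
              refine ⟨st₁, d₁, ?_, fun q hq => by have := hd₁ q hq; omega,
                fun q hq => by have := hst₁ q hq; omega⟩
              rw [hcons, hstep, he]
          | some m =>
            constructor
            · intro M hM
              simp [sIdx1, hs, hc1, hc2] at hM
              subst hM
              obtain ⟨d₁, he, hd₁⟩ := (ih rest hrest (k + 1) st d p).1 m hs
              refine ⟨d₁, ?_, fun q hq => by have := hd₁ q hq; omega⟩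
              rw [hcons, hstep, he]
              have e1 : k + 1 + (m : Int) + 1 = k + ((m : Nat) + 1 : Nat) + 1 := by push_cast; ring
              have e2 : k + 1 + (m : Int) = k + ((m : Nat) + 1 : Nat) := by push_cast; ring
              rw [e1, e2]
              simp
            · intro hM; simp [sIdx1, hs, hc1, hc2] at hM

theorem lookup_append_of_not_mem (p : Int) (a b : List (Int × Int)) (h : p ∉ a.map Prod.fst) :
    List.lookup p (a ++ b) = List.lookup p b := by
  induction a with
  | nil => simp
  | cons x t ih =>
    simp only [List.map_cons, List.mem_cons, not_or] at h
    have : (p == x.1) = false := by simp [h.1]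
    simp [List.lookup, this, ih h.2]

-- the finishing loop appends one (j, n) pair per leftover stack entry
theorem finish_eq (n : Int) (st : List Int) (d : List (Int × Int)) :
    wlbFinish n (st, d) = d ++ st.reverse.map (fun j => (j, n)) := by
  exact PySem.List.foldl_append_singleton_eq_map (fun j => (j, n)) st.reverse d

theorem mem_fst_enum (xs : List Char) (s : Int) (q : Int)
    (hq : q ∈ (PySem.List.enumerate xs s).map Prod.fst) : s ≤ q ∧ q < s + xs.length := by
  simp only [PySem.List.map_fst_enumerate] at hq
  exact (PySem.List.mem_pyRange_one).1 hq

-- the table's value at an open-brace position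
theorem table_lookup (cs : List Char) (p : Nat) (h : (cs.drop p).head? = some '{') :
    List.lookup (p : Int) (wlbTable cs) =
      some (match sIdx1 (cs.drop (p + 1)) with
            | some m' => ((p : Int) + 1 + (m' : Int))
            | none => (cs.length : Int)) := by
  have hlt : p < cs.length := by
    by_contra h'
    rw [List.drop_eq_nil_of_le (by omega)] at h
    simp at h
  have e1 : cs.drop p = '{' :: cs.drop (p + 1) := by
    rcases hd : cs.drop p with _ | ⟨c0, tl⟩
    · rw [hd] at h; simp at h
    · rw [hd] at h
      simp at h
      subst h
      have htl : tl = cs.drop (p + 1) := by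
        have h2 : (cs.drop p).tail = cs.drop (p + 1) := List.tail_drop
        rw [hd] at h2
        simpa using h2
      rw [htl]
  have hsplit : cs = cs.take p ++ '{' :: cs.drop (p + 1) := by
    conv_lhs => rw [← List.take_append_drop p cs]
    rw [e1]
  have hlen : ((cs.take p).length : Int) = (p : Int) := by
    simp [List.length_take, Nat.min_eq_left (le_of_lt hlt)]
  have henum : PySem.List.enumerate cs 0 =
      PySem.List.enumerate (cs.take p) 0 ++
        PySem.List.enumerate ('{' :: cs.drop (p + 1)) (p : Int) := by
    conv_lhs => rw [hsplit]
    rw [PySem.List.enumerate_append]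
    congr 1
    norm_num [List.length_take, Nat.min_eq_left (le_of_lt hlt)]
  -- run pass 1 over the prefix, then over the '{' at p, then use pass1_top for the rest
  have pass1_append : ∀ (a b : List (Int × Char)) (sd : List Int × List (Int × Int)),
      wlbPass1 (a ++ b) sd = wlbPass1 b (wlbPass1 a sd) := by
    intro a b sd; simp [wlbPass1, List.foldl_append]
  obtain ⟨st₀, d₀, h0⟩ : ∃ st₀ d₀,
      wlbPass1 (PySem.List.enumerate (cs.take p) 0) ([], []) = (st₀, d₀) := ⟨_, _, rfl⟩
  have hbound0 : ∀ q : Int, q ∈ (PySem.List.enumerate (cs.take p) 0).map Prod.fst →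
      0 ≤ q ∧ q < (p : Int) := by
    intro q hq
    have h' := mem_fst_enum _ _ _ hq
    have hl : ((cs.take p).length : Int) ≤ (p : Int) := by
      simp [List.length_take]
    constructor
    · linarith [h'.1]
    · linarith [h'.2]
  have hst₀ : ∀ q ∈ st₀, 0 ≤ q ∧ q < (p : Int) := by
    intro q hq
    have h' := pass1_stack_sub (PySem.List.enumerate (cs.take p) 0) ([], []) q
      (by rw [h0]; exact hq)
    rcases h' with h' | h'
    · simp at h'
    · exact hbound0 q h'
  have hd₀ : ∀ q ∈ d₀.map Prod.fst, 0 ≤ q ∧ q < (p : Int) := by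
    obtain ⟨Δ, hΔ, hΔk⟩ := pass1_dict_append (PySem.List.enumerate (cs.take p) 0) ([], [])
    rw [h0] at hΔ
    intro q hq
    rw [show d₀ = Δ from by simpa using hΔ] at hq
    rcases hΔk q hq with h' | h'
    · simp at h'
    · exact hbound0 q h'
  have hmain : wlbPass1 (PySem.List.enumerate cs 0) ([], [])
      = wlbPass1 (PySem.List.enumerate (cs.drop (p + 1)) ((p : Int) + 1)) (p :: st₀, d₀) := by
    rw [henum, pass1_append, h0, PySem.List.enumerate_cons]
    have hstep : wlbStep (st₀, d₀) ((p : Int), '{') = ((p : Int) :: st₀, d₀) := by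
      simp [wlbStep]
    have hcons : ∀ (x : Int × Char) (l : List (Int × Char)) (sd : List Int × List (Int × Int)),
        wlbPass1 (x :: l) sd = wlbPass1 l (wlbStep sd x) := by
      intro x l sd; simp [wlbPass1]
    rw [hcons, hstep]
  have hpd₀ : ((p : Nat) : Int) ∉ d₀.map Prod.fst := by
    intro hmem; have := hd₀ _ hmem; omega
  cases hs : sIdx1 (cs.drop (p + 1)) with
  | some m' =>
    obtain ⟨d₁, he1, hd₁⟩ :=
      (pass1_top (cs.drop (p + 1)).length (cs.drop (p + 1)) le_rfl ((p : Int) + 1) st₀ d₀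
        (p : Int)).1 m' hs
    obtain ⟨st_f, d_f, hf⟩ : ∃ a b,
        wlbPass1 (PySem.List.enumerate ((cs.drop (p + 1)).drop (m' + 1)) ((p : Int) + 1 + m' + 1))
          (st₀, d₀ ++ d₁ ++ [((p : Int), (p : Int) + 1 + m')]) = (a, b) := ⟨_, _, rfl⟩
    obtain ⟨Δ, hΔ, hΔk⟩ := pass1_dict_append
      (PySem.List.enumerate ((cs.drop (p + 1)).drop (m' + 1)) ((p : Int) + 1 + m' + 1))
      (st₀, d₀ ++ d₁ ++ [((p : Int), (p : Int) + 1 + m')])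
    rw [hf] at hΔ
    simp only at hΔ
    have hstf : ∀ q ∈ st_f, q ≠ (p : Int) := by
      intro q hq
      have h' := pass1_stack_sub _ _ q (by rw [hf]; exact hq)
      rcases h' with h' | h'
      · have := hst₀ q h'; omega
      · have := mem_fst_enum _ _ _ h'; omega
    have hΔp : ((p : Nat) : Int) ∉ Δ.map Prod.fst := by
      intro hmem
      rcases hΔk _ hmem with h' | h'
      · have := hst₀ _ h'; omega
      · have := mem_fst_enum _ _ _ h'; omega
    have hd₁p : ((p : Nat) : Int) ∉ d₁.map Prod.fst := by
      intro hmem; have := hd₁ _ hmem; omega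
    have hstfp : ((p : Nat) : Int) ∉ (st_f.reverse.map (fun j => (j, (cs.length : Int)))).map Prod.fst := by
      intro hmem
      simp only [List.map_map, List.map_reverse, List.mem_reverse, List.mem_map] at hmem
      obtain ⟨q, hq, he⟩ := hmem
      simp at he
      exact hstf q hq (by omega)
    unfold wlbTable
    rw [hmain, he1, hf, finish_eq, hΔ]
    simp only [List.append_assoc, List.cons_append, List.nil_append]
    rw [lookup_append_of_not_mem _ d₀ _ hpd₀, lookup_append_of_not_mem _ d₁ _ hd₁p]
    simp [List.lookup]
  | none =>
    obtain ⟨st₁, d₁, he1, hd₁, hst₁⟩ :=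
      (pass1_top (cs.drop (p + 1)).length (cs.drop (p + 1)) le_rfl ((p : Int) + 1) st₀ d₀
        (p : Int)).2 hs
    have hd₁p : ((p : Nat) : Int) ∉ d₁.map Prod.fst := by
      intro hmem; have := hd₁ _ hmem; omega
    unfold wlbTable
    rw [hmain, he1, finish_eq]
    have hrev : (st₁ ++ (p : Int) :: st₀).reverse.map (fun j => (j, (cs.length : Int)))
        = st₀.reverse.map (fun j => (j, (cs.length : Int)))
          ++ ((p : Int), (cs.length : Int)) :: st₁.reverse.map (fun j => (j, (cs.length : Int))) := by
      simp [List.reverse_append]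
    rw [hrev]
    have hst₀p : ((p : Nat) : Int) ∉ (st₀.reverse.map (fun j => (j, (cs.length : Int)))).map Prod.fst := by
      intro hmem
      simp only [List.map_map, List.map_reverse, List.mem_reverse, List.mem_map] at hmem
      obtain ⟨q, hq, he⟩ := hmem
      have := hst₀ q hq
      simp at he
      omega
    simp only [List.append_assoc]
    rw [lookup_append_of_not_mem _ d₀ _ hpd₀, lookup_append_of_not_mem _ d₁ _ hd₁p,
      lookup_append_of_not_mem _ _ _ hst₀p]
    simp [List.lookup]

theorem pass2_ge (cs : List Char) (d : List (Int × Int)) (f : Nat) (i : Int)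
    (h : (cs.length : Int) ≤ i) : wlbPass2 cs d f i = [] := by
  cases f <;> simp [wlbPass2]
  omega

theorem wlaMain_cons (c : Char) (rest : List Char) :
    wlaMain (c :: rest) =
      if (c :: rest).take 5 = wlaPat then
        '(' :: ((c :: rest).take 5 ++ (wlaScan (rest.drop 4) 1).1)
          ++ ')' :: wlaMain (wlaScan (rest.drop 4) 1).2
      else c :: wlaMain rest := by
  rw [wlaMain]

theorem wlbPass2_found (cs : List Char) (d : List (Int × Int)) (fuel : Nat) (i m : Int)
    (h1 : i < (cs.length : Int)) (h2 : PySem.List.slice cs (some i) (some (i + 5)) = wlaPat)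
    (h3 : List.lookup (i + 4) d = some m) :
    wlbPass2 cs d (fuel + 1) i =
      '(' :: (PySem.List.slice cs (some i) (some (m + 1))) ++ ')' :: wlbPass2 cs d fuel (m + 1) := by
  rw [wlbPass2, if_pos h1, h2, if_pos rfl, h3]

theorem wlbPass2_char (cs : List Char) (d : List (Int × Int)) (fuel : Nat) (i : Int) (c : Char)
    (h1 : i < (cs.length : Int)) (h2 : ¬ PySem.List.slice cs (some i) (some (i + 5)) = wlaPat)
    (h3 : PySem.List.pyGet? cs i = some c) :
    wlbPass2 cs d (fuel + 1) i = c :: wlbPass2 cs d fuel (i + 1) := by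
  rw [wlbPass2, if_pos h1, if_neg h2, h3]

theorem pass2_eq (cs : List Char) : ∀ (fuel : Nat) (i : Nat), cs.length ≤ fuel + i →
    wlbPass2 cs (wlbTable cs) fuel (i : Int) = wlaMain (cs.drop i) := by
  intro fuel
  induction fuel with
  | zero =>
    intro i hfi
    rw [List.drop_eq_nil_of_le (by omega)]
    simp [wlbPass2, wlaMain]
  | succ fuel ih =>
    intro i hfi
    by_cases hi : i < cs.length
    · have hi' : (i : Int) < (cs.length : Int) := by exact_mod_cast hi
      have hslice : PySem.List.slice cs (some (i : Int)) (some ((i : Int) + 5))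
          = (cs.drop i).take 5 := by
        rw [show ((i : Int) + 5) = (((i + 5 : Nat)) : Int) by push_cast; ring]
        rw [PySem.List.slice_toNat cs (by positivity) (by positivity)]
        simp only [Int.toNat_natCast]
        congr 1
        omega
      by_cases hp : (cs.drop i).take 5 = wlaPat
      · -- a "\log{" starts at i
        have hdropi : cs.drop i = wlaPat ++ cs.drop (i + 5) := by
          conv_lhs => rw [← List.take_append_drop 5 (cs.drop i)]
          rw [hp, List.drop_drop]
        have hd4 : cs.drop (i + 4) = '{' :: cs.drop (i + 5) := by
          have h4 : cs.drop (i + 4) = (cs.drop i).drop 4 := by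
            rw [List.drop_drop]
          rw [h4, hdropi]
          simp [wlaPat]
        have hlook := table_lookup cs (i + 4) (by rw [hd4]; rfl)
        have hd5 : cs.drop (i + 4 + 1) = cs.drop (i + 5) := by congr 1
        rw [hd5] at hlook
        have hkey : (((i + 4 : Nat)) : Int) = (i : Int) + 4 := by push_cast; ring
        obtain ⟨c0, rest0, hcr⟩ : ∃ c0 rest0, cs.drop i = c0 :: rest0 := by
          rw [hdropi]; exact ⟨_, _, rfl⟩
        have hA : wlaMain (cs.drop i)
            = '(' :: ((cs.drop i).take 5 ++ (wlaScan (cs.drop (i + 5)) 1).1)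
                ++ ')' :: wlaMain (wlaScan (cs.drop (i + 5)) 1).2 := by
          have hr0 : rest0.drop 4 = cs.drop (i + 5) := by
            have h1 : rest0 = cs.drop (i + 1) := by
              have h2 : (cs.drop i).tail = cs.drop (i + 1) := List.tail_drop
              rw [hcr] at h2; simpa using h2
            rw [h1, List.drop_drop]
          rw [hcr, wlaMain_cons, if_pos (by rw [← hcr]; exact hp), hr0, ← hcr]
        have hscan0 := wlaScan_sIdx (cs.drop (i + 5)).length (cs.drop (i + 5)) le_rfl 0
        cases hs : sIdx1 (cs.drop (i + 5)) with
        | some m' =>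
          have hscan : wlaScan (cs.drop (i + 5)) 1
              = ((cs.drop (i + 5)).take (m' + 1), (cs.drop (i + 5)).drop (m' + 1)) := by
            have h' := hscan0.1 m' hs
            simpa [wlaScan_zero] using h'
          rw [hs] at hlook
          have hm : ((i + 4 : Nat) : Int) + 1 + (m' : Int) = (((i + 5 + m' : Nat)) : Int) := by
            push_cast; ring
          have hlook1 : List.lookup ((i : Int) + 4) (wlbTable cs)
              = some (((i + 5 + m' : Nat)) : Int) := by
            rw [← hkey, hlook]
            exact congrArg some hm
          rw [wlbPass2_found cs _ fuel _ _ hi' (by rw [hslice]; exact hp) hlook1]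
          have hnext : (((i + 5 + m' : Nat)) : Int) + 1 = (((i + 6 + m' : Nat)) : Int) := by
            push_cast; ring
          have hsl2 : PySem.List.slice cs (some (i : Int)) (some (((i + 5 + m' : Nat) : Int) + 1))
              = wlaPat ++ (cs.drop (i + 5)).take (m' + 1) := by
            rw [hnext, PySem.List.slice_toNat cs (by positivity) (by positivity)]
            simp only [Int.toNat_natCast]
            rw [show i + 6 + m' - i = 5 + (m' + 1) by omega]
            rw [hdropi, show (5 : Nat) = wlaPat.length by rfl, List.take_length_add_append]
          rw [hnext, ih (i + 6 + m') (by omega), ← hnext, hsl2, hA, hscan]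
          have hd6 : (cs.drop (i + 5)).drop (m' + 1) = cs.drop (i + 6 + m') := by
            rw [List.drop_drop]
            congr 1
            omega
          rw [hp, hd6]
        | none =>
          have hscan : wlaScan (cs.drop (i + 5)) 1 = (cs.drop (i + 5), []) := by
            simpa using hscan0.2 hs
          rw [hs] at hlook
          have hlook2 : List.lookup ((i : Int) + 4) (wlbTable cs)
              = some ((cs.length : Nat) : Int) := by
            rw [← hkey, hlook]
          rw [wlbPass2_found cs _ fuel _ _ hi' (by rw [hslice]; exact hp) hlook2]
          have hsl2 : PySem.List.slice cs (some (i : Int)) (some (((cs.length : Nat) : Int) + 1))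
              = wlaPat ++ cs.drop (i + 5) := by
            rw [show (((cs.length : Nat) : Int) + 1) = (((cs.length + 1 : Nat)) : Int) by push_cast; ring]
            rw [PySem.List.slice_toNat cs (by positivity) (by positivity)]
            simp only [Int.toNat_natCast]
            rw [List.take_of_length_le (by simp; omega), hdropi]
          rw [hsl2, hA, hscan]
          rw [pass2_ge cs (wlbTable cs) fuel (((cs.length : Nat) : Int) + 1) (by omega), hp]
          simp [wlaMain]
      · -- ordinary character at i
        have hget : PySem.List.pyGet? cs (i : Int) = some (cs[i]'hi) := by
          rw [PySem.List.pyGet?_natCast]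
          simp [hi]
        have hdropc : cs.drop i = (cs[i]'hi) :: cs.drop (i + 1) := List.drop_eq_getElem_cons hi
        rw [wlbPass2_char cs _ fuel _ _ hi' (by rw [hslice]; exact hp) hget]
        rw [show ((i : Int) + 1) = (((i + 1 : Nat)) : Int) by push_cast; ring]
        rw [ih (i + 1) (by omega)]
        conv_rhs => rw [hdropc, wlaMain_cons]
        rw [if_neg (by rw [← hdropc]; exact hp)]
    · rw [pass2_ge cs _ _ _ (by exact_mod_cast Nat.le_of_not_lt hi)]
      rw [List.drop_eq_nil_of_le (by omega)]
      simp [wlaMain]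

-- ===== VERDICT (by name: the statement is the Claim_ definition above) =====
theorem wrap_log_expr_spec : Claim_equal_wrap_log_expr := by
  intro text _
  unfold Spec_wrap_log_expr wrap_log_expr wrap_log_expr_alt
  have h := pass2_eq text.toList text.toList.length 0 (by simp)
  simp only [Nat.cast_zero] at h
  rw [h, List.drop_zero]
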